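-- pv_equiv track=rewrite | github.com/dspeziale/oremus | vespri.py | estrai_antifona
-- ===== SOURCE A (Python) =====
-- def estrai_antifona(text):
--     """Estrae prima antifona (prima di SALMO/CANTICO)"""
--     lines = text.split('\n')
--     antifona = []
--
--     for line in lines:
--         if line.startswith('SALMO') or line.startswith('CANTICO'):
--             break
--         antifona.append(line.strip())
--
--     return '\n'.join([l for l in antifona if l])
-- ===== SOURCE B (Python) =====
-- def estrai_antifona(text):
--     """Estrae prima antifona (prima di SALMO/CANTICO)"""
--     out = ''
--     for line in reversed(text.split('\n')):
--         if line.startswith('SALMO') or line.startswith('CANTICO'):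
--             out = ''
--         else:
--             s = line.strip()
--             if s and out:
--                 out = s + '\n' + out
--             elif s:
--                 out = s
--     return out
-- ===== Notes on version B (the rewrite author's own statement) =====
-- stated objective: alternative
-- what changed: B traverses the lines right-to-left in a single pass, clearing the accumulator at each SALMO/CANTICO marker and prepending stripped non-blank lines directly onto the output string, instead of A's forward loop with break that accumulates a list and then filters and joins it.
import Mathlib
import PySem

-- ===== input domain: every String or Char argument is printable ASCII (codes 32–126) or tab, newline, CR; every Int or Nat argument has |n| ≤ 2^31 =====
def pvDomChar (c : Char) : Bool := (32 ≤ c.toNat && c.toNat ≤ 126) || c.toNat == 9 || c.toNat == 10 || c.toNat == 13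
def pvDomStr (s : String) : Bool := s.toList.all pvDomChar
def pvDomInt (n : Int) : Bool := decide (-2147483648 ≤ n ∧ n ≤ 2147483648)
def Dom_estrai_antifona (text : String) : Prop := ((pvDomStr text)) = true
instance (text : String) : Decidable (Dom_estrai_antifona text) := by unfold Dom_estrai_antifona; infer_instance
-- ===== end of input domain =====

-- B replaces A's forward break-loop plus list/filter/join with a single right-to-left pass that
-- builds the result string back-to-front (objective: alternative, same cost, no intermediate list).
-- Both ports work on code-point lists (PySem.Chars), the exact form of Python str here.

-- ===== PORT A =====
-- the 'for line in lines: if startswith… break; antifona.append(line.strip())' loop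
def pvLoopA (acc : List (List Char)) : List (List Char) → List (List Char)
  | [] => acc
  | l :: ls =>
      if PySem.Chars.startswith l (['S', 'A', 'L', 'M', 'O'] : List Char) || PySem.Chars.startswith l (['C', 'A', 'N', 'T', 'I', 'C', 'O'] : List Char) then
        acc
      else
        pvLoopA (acc ++ [PySem.Chars.strip l]) ls

def estrai_antifona (text : String) : String :=
  let lines := PySem.Chars.splitOn text.toList ['\n']
  let antifona := pvLoopA [] lines
  String.ofList (PySem.Chars.join ['\n'] (antifona.filter (fun l => !l.isEmpty)))

-- ===== PORT B =====
-- the 'for line in reversed(lines): …' loop of Source B, accumulating the output string directly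
def pvLoopB (out : List Char) : List (List Char) → List Char
  | [] => out
  | l :: ls =>
      let out' :=
        if PySem.Chars.startswith l (['S', 'A', 'L', 'M', 'O'] : List Char) || PySem.Chars.startswith l (['C', 'A', 'N', 'T', 'I', 'C', 'O'] : List Char) then
          []
        else
          let s := PySem.Chars.strip l
          if !s.isEmpty && !out.isEmpty then s ++ '\n' :: out
          else if !s.isEmpty then s
          else out
      pvLoopB out' ls

def estrai_antifona_alt (text : String) : String :=
  String.ofList (pvLoopB [] ((PySem.Chars.splitOn text.toList ['\n']).reverse))

-- ===== PRECONDITION & SPEC =====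
def Spec_estrai_antifona (text : String) (out : String) : Prop := out = estrai_antifona_alt text
instance (text : String) (out : String) : Decidable (Spec_estrai_antifona text out) := by unfold Spec_estrai_antifona; infer_instance

-- ===== CLAIM (what is proved, stated in full; the proofs are below) =====
def Claim_equal_estrai_antifona : Prop := ∀ (text : String), Dom_estrai_antifona text → Spec_estrai_antifona text (estrai_antifona text)

-- ===== LEMMAS AND PROOFS =====

-- common normal form of both programs on the line list
def pvSpec (ls : List (List Char)) : List Char :=
  PySem.Chars.join ['\n']
    (((ls.takeWhile (fun l =>
        !(PySem.Chars.startswith l (['S', 'A', 'L', 'M', 'O'] : List Char) || PySem.Chars.startswith l (['C', 'A', 'N', 'T', 'I', 'C', 'O'] : List Char)))).map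
        PySem.Chars.strip).filter (fun l => !l.isEmpty))

theorem pvLoopA_eq (ls : List (List Char)) : ∀ acc,
    pvLoopA acc ls = acc ++ (ls.takeWhile (fun l =>
      !(PySem.Chars.startswith l (['S', 'A', 'L', 'M', 'O'] : List Char) ||
        PySem.Chars.startswith l (['C', 'A', 'N', 'T', 'I', 'C', 'O'] : List Char)))).map PySem.Chars.strip := by
  induction ls with
  | nil => intro acc; simp [pvLoopA]
  | cons l ls ih =>
      intro acc
      by_cases ha : PySem.Chars.startswith l (['S', 'A', 'L', 'M', 'O'] : List Char) = true
      · simp [pvLoopA, ha]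
      · by_cases hb : PySem.Chars.startswith l (['C', 'A', 'N', 'T', 'I', 'C', 'O'] : List Char) = true
        · simp [pvLoopA, hb]
        · have ha' : PySem.Chars.startswith l (['S', 'A', 'L', 'M', 'O'] : List Char) = false := by simpa using ha
          have hb' : PySem.Chars.startswith l (['C', 'A', 'N', 'T', 'I', 'C', 'O'] : List Char) = false := by simpa using hb
          simp [pvLoopA, ha', hb', ih]

theorem pvA_eq (text : String) :
    estrai_antifona text = String.ofList (pvSpec (PySem.Chars.splitOn text.toList ['\n'])) := by
  simp [estrai_antifona, pvSpec, pvLoopA_eq]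

theorem pvLoopB_append (l : List Char) (ls : List (List Char)) : ∀ out,
    pvLoopB out (ls ++ [l]) =
      (if PySem.Chars.startswith l (['S', 'A', 'L', 'M', 'O'] : List Char) ||
          PySem.Chars.startswith l (['C', 'A', 'N', 'T', 'I', 'C', 'O'] : List Char) then []
       else
         if !(PySem.Chars.strip l).isEmpty && !(pvLoopB out ls).isEmpty then
           PySem.Chars.strip l ++ '\n' :: pvLoopB out ls
         else if !(PySem.Chars.strip l).isEmpty then PySem.Chars.strip l
         else pvLoopB out ls) := by
  induction ls with
  | nil => intro out; simp [pvLoopB]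
  | cons a as ih => intro out; simp only [List.cons_append, pvLoopB, ih]

theorem pv_join_ne_nil (y : List Char) (ys : List (List Char)) (hy : y ≠ []) :
    PySem.Chars.join ['\n'] (y :: ys) ≠ [] := by
  cases ys with
  | nil => simpa [PySem.Chars.join_singleton] using hy
  | cons z zs =>
      rw [PySem.Chars.join_cons_cons]
      simp

theorem pv_filter_ne_nil (L : List (List Char)) :
    ∀ x ∈ L.filter (fun l => !l.isEmpty), x ≠ [] := by
  intro x hx
  have := List.of_mem_filter hx
  cases x <;> simp_all

theorem pv_spec_cons_aux (s : List Char) (F : List (List Char)) (hs : s ≠ [])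
    (hF : ∀ x ∈ F, x ≠ []) :
    (if !s.isEmpty && !(PySem.Chars.join ['\n'] F).isEmpty then
        s ++ '\n' :: PySem.Chars.join ['\n'] F
     else if !s.isEmpty then s
     else PySem.Chars.join ['\n'] F) = PySem.Chars.join ['\n'] (s :: F) := by
  have hsE : s.isEmpty = false := by cases s <;> simp_all
  cases F with
  | nil => simp [PySem.Chars.join_nil, PySem.Chars.join_singleton, hsE]
  | cons y ys =>
      have hne : PySem.Chars.join ['\n'] (y :: ys) ≠ [] :=
        pv_join_ne_nil y ys (hF y (List.mem_cons_self ..))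
      have hneE : (PySem.Chars.join ['\n'] (y :: ys)).isEmpty = false := by
        cases hval : PySem.Chars.join ['\n'] (y :: ys) <;> simp_all
      rw [PySem.Chars.join_cons_cons]
      simp [hsE, hneE]

theorem pvLoopB_eq (ls : List (List Char)) :
    pvLoopB [] ls.reverse = pvSpec ls := by
  induction ls with
  | nil => simp [pvLoopB, pvSpec, PySem.Chars.join_nil]
  | cons l ls ih =>
      rw [List.reverse_cons, pvLoopB_append, ih]
      by_cases ha : PySem.Chars.startswith l (['S', 'A', 'L', 'M', 'O'] : List Char) = true
      · simp [ha, pvSpec, PySem.Chars.join_nil]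
      · by_cases hb : PySem.Chars.startswith l (['C', 'A', 'N', 'T', 'I', 'C', 'O'] : List Char) = true
        · simp [hb, pvSpec, PySem.Chars.join_nil]
        · have ha' : PySem.Chars.startswith l (['S', 'A', 'L', 'M', 'O'] : List Char) = false := by simpa using ha
          have hb' : PySem.Chars.startswith l (['C', 'A', 'N', 'T', 'I', 'C', 'O'] : List Char) = false := by simpa using hb
          unfold pvSpec
          rw [List.takeWhile_cons, if_pos (show (!(PySem.Chars.startswith l (['S', 'A', 'L', 'M', 'O'] : List Char) ||
              PySem.Chars.startswith l (['C', 'A', 'N', 'T', 'I', 'C', 'O'] : List Char))) = true by simp [ha', hb']),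
            List.map_cons, List.filter_cons,
            if_neg (show ¬ (PySem.Chars.startswith l (['S', 'A', 'L', 'M', 'O'] : List Char) ||
              PySem.Chars.startswith l (['C', 'A', 'N', 'T', 'I', 'C', 'O'] : List Char)) = true by simp [ha', hb'])]
          by_cases hs : PySem.Chars.strip l = []
          · simp [hs]
          · conv_rhs => rw [if_pos (show (!(PySem.Chars.strip l).isEmpty) = true by simp [hs])]
            exact pv_spec_cons_aux _ _ hs (pv_filter_ne_nil _)

theorem pvB_eq (text : String) :
    estrai_antifona_alt text = String.ofList (pvSpec (PySem.Chars.splitOn text.toList ['\n'])) := by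
  simp [estrai_antifona_alt, pvLoopB_eq]

-- ===== VERDICT (by name: the statement is the Claim_ definition above) =====
theorem estrai_antifona_spec : Claim_equal_estrai_antifona := by
  intro text _
  show estrai_antifona text = estrai_antifona_alt text
  rw [pvA_eq, pvB_eq]
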